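-- pv_equiv track=rewrite | github.com/SeoinBack/CatGPT | catgpt/dataset/dataset_utils.py | count_ads_atoms
-- ===== SOURCE A (Python) =====
-- def count_ads_atoms(adsorbate_symbol: str) -> int:
--     def parse_formula(formula: str) -> dict:
--         stack = [{}]
--         i = 0
--         n = len(formula)
--
--         while i < n:
--             if formula[i] == '(':
--                 stack.append({})
--                 i += 1
--             elif formula[i] == ')':
--                 top = stack.pop()
--                 i += 1
--                 start = i
--                 while i < n and formula[i].isdigit():
--                     i += 1
--                 multiplier = int(formula[start:i] or '1')
--                 for elem, cnt in top.items():
--                     stack[-1][elem] = stack[-1].get(elem, 0) + cnt * multiplier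
--             else:
--                 elem = formula[i]
--                 i += 1
--                 start = i
--                 while i < n and formula[i].isdigit():
--                     i += 1
--                 count = int(formula[start:i] or '1')
--                 stack[-1][elem] = stack[-1].get(elem, 0) + count
--
--         return stack[0]
--
--     clean_formula = adsorbate_symbol.replace('*', '')
--     atom_counts = parse_formula(clean_formula)
--     total_atoms = sum(atom_counts.values())
--
--     return total_atoms
-- ===== SOURCE B (Python) =====
-- def count_ads_atoms(adsorbate_symbol: str) -> int:
--     f = adsorbate_symbol.replace('*', '')
--     n = len(f)
--
--     def num(i):
--         j = i
--         while i < n and f[i].isdigit():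
--             i += 1
--         return int(f[j:i] or '1'), i
--
--     def group(i):
--         # returns (total, next_index, closing_multiplier_or_None)
--         total = 0
--         while i < n:
--             c = f[i]
--             i += 1
--             if c == '(':
--                 sub, i, m = group(i)
--                 if m is not None:
--                     total += sub * m
--             elif c == ')':
--                 m, i = num(i)
--                 return total, i, m
--             else:
--                 cnt, i = num(i)
--                 total += cnt
--         return total, i, None
--
--     total, _, _ = group(0)
--     return total
-- ===== Notes on version B (the rewrite author's own statement) =====
-- stated objective: alternative
-- what changed: Replaces the iterative scan that maintains a stack of per-element count dictionaries (merged on every ')' and summed at the end) by a top-down recursive-descent parser whose recursive group() call returns the integer atom total of one parenthesised group directly; no stack, no dicts, no final sum().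
-- outside the precondition, e.g. on count_ads_atoms(')(H'): A returns 1, B returns 0; on count_ads_atoms(')'): A raises IndexError, B returns 0
import Mathlib
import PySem

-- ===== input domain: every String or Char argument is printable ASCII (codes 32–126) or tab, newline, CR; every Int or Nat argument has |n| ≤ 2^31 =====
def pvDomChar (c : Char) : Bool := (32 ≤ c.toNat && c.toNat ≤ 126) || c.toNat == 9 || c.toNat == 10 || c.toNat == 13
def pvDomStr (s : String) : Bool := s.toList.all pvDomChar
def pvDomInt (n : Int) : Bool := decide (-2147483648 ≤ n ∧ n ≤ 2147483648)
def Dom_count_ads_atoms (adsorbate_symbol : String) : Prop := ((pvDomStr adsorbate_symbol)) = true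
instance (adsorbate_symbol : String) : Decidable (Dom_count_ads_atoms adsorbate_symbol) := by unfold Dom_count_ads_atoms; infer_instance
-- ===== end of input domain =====

-- B replaces A's iterative scan with a stack of per-element count dictionaries by a
-- top-down recursive-descent parser returning each group's integer atom total directly
-- (no stack, no dicts, no final sum): objective 'alternative'.


-- ===== PORT A =====
-- shared inner digit scan: `start = i; while i < n and formula[i].isdigit(): i += 1`
-- (returns the scanned digit run and the remaining characters); both Pythons contain
-- this loop verbatim.
def pvSpanDigits : List Char → List Char × List Char
  | [] => ([], [])
  | c :: cs =>
    if PySem.Chars.isdigit c then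
      let (ds, r) := pvSpanDigits cs
      (c :: ds, r)
    else ([], c :: cs)

-- `int(formula[start:i] or '1')` (the scanned run is all digits, so int() never raises;
-- the .getD 0 default is unreachable)
def pvIntOfRun (ds : List Char) : Int :=
  (PySem.Int.ofChars? (if ds.isEmpty then ['1'] else ds)).getD 0

theorem pvSpanDigits_snd_len (cs : List Char) : (pvSpanDigits cs).2.length ≤ cs.length := by
  induction cs with
  | nil => simp [pvSpanDigits]
  | cons c cs ih =>
    simp only [pvSpanDigits]
    split
    · simpa using Nat.le_succ_of_le ih
    · simp

-- A's while loop; the stack grows at its HEAD (head = Python's stack[-1], last = stack[0]).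
-- On inputs where Python raises IndexError (')' with stack[-1] missing) the match falls
-- through to an unreachable default — those inputs are excluded by Pre_ below.
def pvLoopA : List Char → List (PySem.Dict Char Int) → List (PySem.Dict Char Int)
  | [], stack => stack
  | c :: cs, stack =>
    if c = '(' then pvLoopA cs (PySem.Dict.empty :: stack)
    else if c = ')' then
      match stack with
      | top :: d :: tl =>
        let p := pvSpanDigits cs
        let m := pvIntOfRun p.1
        pvLoopA p.2 ((top.items.foldl (fun acc q => acc.insert q.1 (acc.getD q.1 0 + q.2 * m)) d) :: tl)
      | other => other
    else
      let p := pvSpanDigits cs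
      let cnt := pvIntOfRun p.1
      match stack with
      | d :: tl => pvLoopA p.2 ((d.insert c (d.getD c 0 + cnt)) :: tl)
      | [] => []
  termination_by cs _ => cs.length
  decreasing_by
    all_goals first
      | (exact Nat.lt_succ_of_le (pvSpanDigits_snd_len cs))
      | simp

def count_ads_atoms (adsorbate_symbol : String) : Int :=
  let clean := PySem.Chars.replace adsorbate_symbol.toList ['*'] []
  let atom_counts := (pvLoopA clean [PySem.Dict.empty]).getLastD PySem.Dict.empty
  atom_counts.values.sum

-- ===== PORT B =====
-- B's recursive-descent parser. `group(i)`'s while loop is the tail recursion on the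
-- character list with `total` as accumulator; a nested '(' makes the recursive call,
-- whose returned rest list is ≤ the input (carried in the subtype) for termination.
-- Result = (total, rest, closing multiplier or none at EOF).
def pvGroup : (cs : List Char) → (total : Int) → {p : Int × List Char × Option Int // p.2.1.length ≤ cs.length}
  | [], total => ⟨(total, [], none), by simp⟩
  | c :: cs, total =>
    if c = '(' then
      match pvGroup cs 0 with
      | ⟨(sub, r, mm), hr⟩ =>
        let t' : Int := match mm with | some m => total + sub * m | none => total
        match pvGroup r t' with
        | ⟨res, hres⟩ => ⟨res, by
            have hr' : r.length ≤ cs.length := hr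
            have hres' : res.2.1.length ≤ r.length := hres
            simp only [List.length_cons]; omega⟩
    else if c = ')' then
      let p := pvSpanDigits cs
      ⟨(total, p.2, some (pvIntOfRun p.1)), by
        simpa using Nat.le_succ_of_le (pvSpanDigits_snd_len cs)⟩
    else
      let p := pvSpanDigits cs
      match pvGroup p.2 (total + pvIntOfRun p.1) with
      | ⟨res, hres⟩ => ⟨res, by
          have := pvSpanDigits_snd_len cs
          have hres' : res.2.1.length ≤ (pvSpanDigits cs).2.length := hres
          simp only [List.length_cons]; omega⟩
  termination_by cs _ => cs.length
  decreasing_by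
    · simp
    · have hr' : r.length ≤ cs.length := hr
      simp only [List.length_cons]; omega
    · have := pvSpanDigits_snd_len cs
      simp only [List.length_cons]; omega

def count_ads_atoms_alt (adsorbate_symbol : String) : Int :=
  let clean := PySem.Chars.replace adsorbate_symbol.toList ['*'] []
  (pvGroup clean 0).val.1

-- ===== PRECONDITION & SPEC =====
-- Pre_ excludes strings whose '*'-cleaned form has a prefix with more ')' than '(' :
-- there A's stack empties and A either raises IndexError or returns an accidental value
-- of the lost bottom frame (e.g. ')(H' → 1), while B's parser treats the stray ')'
-- as closing the whole formula and ignores what follows (')(H' → 0).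
def Pre_count_ads_atoms (adsorbate_symbol : String) : Prop :=
  ∀ p ∈ (PySem.Chars.replace adsorbate_symbol.toList ['*'] []).inits,
    p.count ')' ≤ p.count '('
instance (adsorbate_symbol : String) : Decidable (Pre_count_ads_atoms adsorbate_symbol) := by
  unfold Pre_count_ads_atoms; infer_instance

def pvWitness_count_ads_atoms : String := "*CH2(OH)2"

def Spec_count_ads_atoms (adsorbate_symbol : String) (out : Int) : Prop := out = count_ads_atoms_alt adsorbate_symbol
instance (adsorbate_symbol : String) (out : Int) : Decidable (Spec_count_ads_atoms adsorbate_symbol out) := by unfold Spec_count_ads_atoms; infer_instance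

-- ===== CLAIM (what is proved, stated in full; the proofs are below) =====
def Claim_equal_count_ads_atoms : Prop := ∀ (adsorbate_symbol : String), Dom_count_ads_atoms adsorbate_symbol → Pre_count_ads_atoms adsorbate_symbol → Spec_count_ads_atoms adsorbate_symbol (count_ads_atoms adsorbate_symbol)

-- ===== LEMMAS AND PROOFS =====
-- Proof-only intermediate: an integer-total stack scan pvLoopB; stage 1 proves
-- A (dict stacks + final sum) equals getLastD of pvLoopB under Pre_, stage 2 proves
-- pvLoopB's bottom total equals B's recursive parser unconditionally.
def pvLoopB : List Char → List Int → List Int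
  | [], stack => stack
  | c :: cs, stack =>
    if c = '(' then pvLoopB cs (0 :: stack)
    else if c = ')' then
      match stack with
      | child :: t :: tl =>
        let p := pvSpanDigits cs
        pvLoopB p.2 ((t + child * pvIntOfRun p.1) :: tl)
      | other => other
    else
      let p := pvSpanDigits cs
      match stack with
      | t :: tl => pvLoopB p.2 ((t + pvIntOfRun p.1) :: tl)
      | [] => []
  termination_by cs _ => cs.length
  decreasing_by
    all_goals first
      | (exact Nat.lt_succ_of_le (pvSpanDigits_snd_len cs))
      | simp

-- total atoms held by one dict frame
def pvSumV (d : PySem.Dict Char Int) : Int := d.values.sum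

-- prefix-balance hypothesis, with the running depth k as accumulator
def pvBal (cs : List Char) (k : Nat) : Prop :=
  ∀ n : Nat, (cs.take n).count ')' + 1 ≤ k + (cs.take n).count '('

theorem pvLoopA_nil (stack : List (PySem.Dict Char Int)) : pvLoopA [] stack = stack := by
  rw [pvLoopA.eq_def]

theorem pvLoopB_nil (stack : List Int) : pvLoopB [] stack = stack := by
  rw [pvLoopB.eq_def]

theorem pvLoopA_cons (c : Char) (cs : List Char) (stack : List (PySem.Dict Char Int)) :
    pvLoopA (c :: cs) stack =
      if c = '(' then pvLoopA cs (PySem.Dict.empty :: stack)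
      else if c = ')' then
        match stack with
        | top :: d :: tl =>
          pvLoopA (pvSpanDigits cs).2
            ((top.items.foldl (fun acc q =>
                acc.insert q.1 (acc.getD q.1 0 + q.2 * pvIntOfRun (pvSpanDigits cs).1)) d) :: tl)
        | other => other
      else
        match stack with
        | d :: tl =>
          pvLoopA (pvSpanDigits cs).2
            ((d.insert c (d.getD c 0 + pvIntOfRun (pvSpanDigits cs).1)) :: tl)
        | [] => [] := by
  rw [pvLoopA.eq_def]

theorem pvLoopB_cons (c : Char) (cs : List Char) (stack : List Int) :
    pvLoopB (c :: cs) stack =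
      if c = '(' then pvLoopB cs (0 :: stack)
      else if c = ')' then
        match stack with
        | child :: t :: tl =>
          pvLoopB (pvSpanDigits cs).2 ((t + child * pvIntOfRun (pvSpanDigits cs).1) :: tl)
        | other => other
      else
        match stack with
        | t :: tl => pvLoopB (pvSpanDigits cs).2 ((t + pvIntOfRun (pvSpanDigits cs).1) :: tl)
        | [] => [] := by
  rw [pvLoopB.eq_def]

theorem pvSpanDigits_spec (cs : List Char) :
    cs = (pvSpanDigits cs).1 ++ (pvSpanDigits cs).2 ∧
      ∀ d ∈ (pvSpanDigits cs).1, PySem.Chars.isdigit d = true := by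
  induction cs with
  | nil => simp [pvSpanDigits]
  | cons c cs ih =>
    simp only [pvSpanDigits]
    split
    · rename_i hd
      refine ⟨by simpa using ih.1, ?_⟩
      intro d hdmem
      simp only [List.mem_cons] at hdmem
      rcases hdmem with rfl | hdmem
      · exact hd
      · exact ih.2 d hdmem
    · simp

theorem pv_sum_replace (l : List (Char × Int)) (k : Char) (v w : Int)
    (hnd : (l.map (·.1)).Nodup) (hw : (k, w) ∈ l) :
    ((l.map (fun p => if p.1 == k then (k, v) else p)).map (·.2)).sum
      = (l.map (·.2)).sum - w + v := by
  induction l with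
  | nil => simp at hw
  | cons p l ih =>
    simp only [List.map_cons, List.nodup_cons, List.mem_map] at hnd
    rcases List.mem_cons.mp hw with h | h
    · subst h
      have hrepl : List.map (fun p => if p.1 == k then (k, v) else p) l = List.map id l := by
        apply List.map_congr_left
        intro q hq
        have hq1 : q.1 ≠ k := fun hqk => hnd.1 ⟨q, hq, hqk⟩
        simp [hq1]
      simp only [List.map_cons, List.sum_cons, beq_self_eq_true, if_pos, hrepl, List.map_id]
      ring
    · have hpk : p.1 ≠ k := fun hpk => hnd.1 ⟨(k, w), h, by simp [hpk]⟩
      simp only [List.map_cons, List.sum_cons]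
      rw [if_neg (by simp [hpk]), ih hnd.2 h]
      ring

theorem pv_sumV_insert (d : PySem.Dict Char Int) (k : Char) (c : Int)
    (hnd : d.keys.Nodup) :
    pvSumV (d.insert k (d.getD k 0 + c)) = pvSumV d + c := by
  by_cases hc : d.contains k = true
  · obtain ⟨w, hw⟩ : ∃ w, d.get? k = some w := by
      rw [PySem.Dict.contains_eq_isSome_get?] at hc
      exact Option.isSome_iff_exists.mp hc
    have hmem : (k, w) ∈ d.items := PySem.Dict.mem_items_of_get?_eq_some _ hw
    have hgd : d.getD k 0 = w := by
      rw [PySem.Dict.getD_eq_get?_getD, hw]; rfl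
    have hitems := PySem.Dict.items_insert_of_contains (d := d) (k := k)
      (v := d.getD k 0 + c) hc
    simp only [pvSumV, PySem.Dict.values, hitems]
    rw [pv_sum_replace d.items k (d.getD k 0 + c) w (by exact hnd) hmem, hgd]
    ring
  · have hitems := PySem.Dict.items_insert_of_not_contains (d := d) (k := k)
      (v := d.getD k 0 + c) (by simpa using hc)
    have hgd : d.getD k 0 = 0 := PySem.Dict.getD_of_not_contains _ _ (by simpa using hc)
    simp only [pvSumV, PySem.Dict.values, hitems]
    simp [hgd]

theorem pv_sumV_merge (l : List (Char × Int)) (d : PySem.Dict Char Int) (m : Int)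
    (hnd : d.keys.Nodup) :
    pvSumV (l.foldl (fun acc q => acc.insert q.1 (acc.getD q.1 0 + q.2 * m)) d)
      = pvSumV d + (l.map (·.2)).sum * m ∧
    (l.foldl (fun acc q => acc.insert q.1 (acc.getD q.1 0 + q.2 * m)) d).keys.Nodup := by
  induction l generalizing d with
  | nil => simpa using hnd
  | cons q l ih =>
    simp only [List.foldl_cons, List.map_cons, List.sum_cons]
    have hnd' : (d.insert q.1 (d.getD q.1 0 + q.2 * m)).keys.Nodup :=
      PySem.Dict.nodup_keys_insert _ _ _ hnd
    have h := ih (d.insert q.1 (d.getD q.1 0 + q.2 * m)) hnd'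
    refine ⟨?_, h.2⟩
    rw [h.1, pv_sumV_insert _ _ _ hnd]
    ring

theorem pv_digit_count (ds : List Char) (hds : ∀ d ∈ ds, PySem.Chars.isdigit d = true)
    (x : Char) (hx : PySem.Chars.isdigit x = false) : ds.count x = 0 := by
  refine List.count_eq_zero.mpr (fun hmem => ?_)
  have := hds x hmem
  rw [hx] at this
  exact Bool.false_ne_true this

theorem pv_count_take (c : Char) (ds r : List Char)
    (hds : ∀ d ∈ ds, PySem.Chars.isdigit d = true) (n : Nat) (x : Char)
    (hx : PySem.Chars.isdigit x = false) :
    ((c :: (ds ++ r)).take (1 + ds.length + n)).count x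
      = (if c = x then 1 else 0) + (r.take n).count x := by
  have h1 : 1 + ds.length + n = (ds.length + n) + 1 := by omega
  rw [h1, List.take_succ_cons, List.take_append, List.count_cons,
    List.take_of_length_le (by omega), show ds.length + n - ds.length = n by omega,
    List.count_append, pv_digit_count ds hds x hx]
  by_cases hcx : c = x <;> simp [hcx] <;> try omega

-- ===== stage 1: A ↔ pvLoopB (int-stack scan), pointwise pvSumV of the dict stack ====
theorem pv_main_aux : ∀ (N : Nat) (cs : List Char), cs.length ≤ N →
    ∀ (sA : List (PySem.Dict Char Int)),
    pvBal cs sA.length → sA ≠ [] → (∀ d ∈ sA, d.keys.Nodup) →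
    pvLoopB cs (sA.map pvSumV) = (pvLoopA cs sA).map pvSumV ∧ pvLoopA cs sA ≠ [] := by
  intro N
  induction N with
  | zero =>
    intro cs hlen sA _ hne _
    have : cs = [] := List.eq_nil_of_length_eq_zero (Nat.le_zero.mp hlen)
    subst this
    exact ⟨by rw [pvLoopA_nil, pvLoopB_nil], by rw [pvLoopA_nil]; exact hne⟩
  | succ N ih =>
    intro cs hlen sA hbal hne hnd
    cases cs with
    | nil =>
      exact ⟨by rw [pvLoopA_nil, pvLoopB_nil], by rw [pvLoopA_nil]; exact hne⟩
    | cons c cs =>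
      obtain ⟨hsplit, hdig⟩ := pvSpanDigits_spec cs
      by_cases hc : c = '('
      · -- push an empty frame
        subst hc
        rw [pvLoopA_cons, pvLoopB_cons]
        simp only [if_true]
        have hbal' : pvBal cs (PySem.Dict.empty :: sA).length := by
          intro n
          have := hbal (n + 1)
          simp [List.take_succ_cons] at this
          simp only [List.length_cons]
          omega
        have h := ih cs (by simp at hlen; omega)
          (PySem.Dict.empty :: sA) hbal' (by simp) ?_
        · have hz : pvSumV (PySem.Dict.empty : PySem.Dict Char Int) = 0 := rfl
          constructor
          · have : (PySem.Dict.empty :: sA).map pvSumV = 0 :: sA.map pvSumV := by simp [hz]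
            rw [← this]
            exact h.1
          · exact h.2
        · intro d hd
          rcases List.mem_cons.mp hd with rfl | hd
          · simp
          · exact hnd d hd
      · by_cases hc2 : c = ')'
        · -- pop and merge
          subst hc2
          have hk2 : 2 ≤ sA.length := by
            have := hbal 1
            simp only [List.take_succ_cons, List.take_zero, List.count_cons, List.count_nil] at this
            simp at this
            omega
          obtain ⟨top, d, tl, rfl⟩ : ∃ top d tl, sA = top :: d :: tl := by
            cases sA with
            | nil => simp at hk2
            | cons a sA' =>
              cases sA' with
              | nil => simp at hk2
              | cons b tl => exact ⟨a, b, tl, rfl⟩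
          rw [pvLoopA_cons, pvLoopB_cons]
          simp only [List.map_cons, if_neg (by decide : ¬ (')' = '(')), if_true]
          set ds := (pvSpanDigits cs).1 with hds_def
          set r := (pvSpanDigits cs).2 with hr_def
          set m := pvIntOfRun ds with hm_def
          have hndd : d.keys.Nodup := hnd d (by simp)
          have hmerge := pv_sumV_merge top.items d m hndd
          have hbal' : pvBal r (((top.items.foldl
              (fun acc q => acc.insert q.1 (acc.getD q.1 0 + q.2 * m)) d)) :: tl).length := by
            intro n
            have := hbal (1 + ds.length + n)
            rw [show (')' :: cs) = ')' :: (ds ++ r) by rw [← hsplit]] at this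
            rw [pv_count_take _ ds r hdig n _ (by decide),
              pv_count_take _ ds r hdig n _ (by decide)] at this
            simp only [List.length_cons] at this ⊢
            simp at this
            omega
          have hlen' : r.length ≤ N := by
            have hsl := pvSpanDigits_snd_len cs
            rw [← hr_def] at hsl
            simp only [List.length_cons] at hlen
            omega
          have h := ih r hlen' _ hbal' (by simp) ?_
          · constructor
            · rw [← h.1]
              congr 1
              simp only [List.map_cons]
              congr 1
              rw [hmerge.1]
              simp [pvSumV, PySem.Dict.values]
            · exact h.2
          · intro e he
            rcases List.mem_cons.mp he with rfl | he
            · exact hmerge.2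
            · exact hnd e (by simp [he])
        · -- ordinary element character
          obtain ⟨d, tl, rfl⟩ : ∃ d tl, sA = d :: tl := by
            cases sA with
            | nil => exact absurd rfl hne
            | cons a tl => exact ⟨a, tl, rfl⟩
          rw [pvLoopA_cons, pvLoopB_cons]
          simp only [List.map_cons, if_neg hc, if_neg hc2]
          set ds := (pvSpanDigits cs).1 with hds_def
          set r := (pvSpanDigits cs).2 with hr_def
          set cnt := pvIntOfRun ds with hcnt_def
          have hndd : d.keys.Nodup := hnd d (by simp)
          have hins := pv_sumV_insert d c cnt hndd
          have hbal' : pvBal r ((d.insert c (d.getD c 0 + cnt)) :: tl).length := by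
            intro n
            have := hbal (1 + ds.length + n)
            rw [show (c :: cs) = c :: (ds ++ r) by rw [← hsplit]] at this
            rw [pv_count_take _ ds r hdig n _ (by decide),
              pv_count_take _ ds r hdig n _ (by decide)] at this
            rw [if_neg hc2, if_neg hc] at this
            simp only [List.length_cons] at this ⊢
            omega
          have hlen' : r.length ≤ N := by
            have hsl := pvSpanDigits_snd_len cs
            rw [← hr_def] at hsl
            simp only [List.length_cons] at hlen
            omega
          have h := ih r hlen' _ hbal' (by simp) ?_
          · constructor
            · rw [← h.1]
              congr 2
              rw [hins]
            · exact h.2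
          · intro e he
            rcases List.mem_cons.mp he with rfl | he
            · exact PySem.Dict.nodup_keys_insert _ _ _ hndd
            · exact hnd e (by simp [he])

theorem pv_main (cs : List Char) : ∀ (sA : List (PySem.Dict Char Int)),
    pvBal cs sA.length → sA ≠ [] → (∀ d ∈ sA, d.keys.Nodup) →
    pvLoopB cs (sA.map pvSumV) = (pvLoopA cs sA).map pvSumV ∧ pvLoopA cs sA ≠ [] :=
  pv_main_aux cs.length cs le_rfl

theorem pv_pre_bal (s : String) (h : Pre_count_ads_atoms s) :
    pvBal (PySem.Chars.replace s.toList ['*'] []) 1 := by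
  intro n
  have h := h ((PySem.Chars.replace s.toList ['*'] []).take n) (by rw [List.mem_inits]; exact List.take_prefix n _)
  omega

theorem pv_getLastD_map (f : PySem.Dict Char Int → Int) (l : List (PySem.Dict Char Int))
    (hl : l ≠ []) (d : Int) (d0 : PySem.Dict Char Int) :
    (l.map f).getLastD d = f (l.getLastD d0) := by
  induction l with
  | nil => exact absurd rfl hl
  | cons a l ih =>
    cases l with
    | nil => rfl
    | cons b l => simpa using ih (by simp)

-- ===== stage 2: pvGroup ↔ pvLoopB, unconditionally =====
theorem pvGroup_nil (total : Int) : (pvGroup [] total).val = (total, [], none) := by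
  rw [pvGroup.eq_def]

theorem pvGroup_cons (c : Char) (cs : List Char) (total : Int) :
    (pvGroup (c :: cs) total).val =
      if c = '(' then
        (pvGroup (pvGroup cs 0).val.2.1
          (match (pvGroup cs 0).val.2.2 with
           | some m => total + (pvGroup cs 0).val.1 * m
           | none => total)).val
      else if c = ')' then
        (total, (pvSpanDigits cs).2, some (pvIntOfRun (pvSpanDigits cs).1))
      else
        (pvGroup (pvSpanDigits cs).2 (total + pvIntOfRun (pvSpanDigits cs).1)).val := by
  rw [pvGroup.eq_def]
  by_cases h1 : c = '('
  · simp only [h1]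
    rcases hg : pvGroup cs 0 with ⟨⟨sub, r, mm⟩, hr⟩
    cases mm <;> rfl
  · by_cases h2 : c = ')'
    · simp [h2]
    · simp only [h1, h2, if_false]

-- The stage-2 invariant: on any suffix cs with accumulated top total `total`,
-- (a) if the parser ends at EOF (none), pvLoopB leaves junk frames above T :: stk;
-- (b) if it ends at a ')' (some m), pvLoopB with ≥2 frames folds T*m into the frame
--     below and continues on the rest, and with exactly 1 frame stops at [T].
theorem pv_stage2_aux : ∀ (N : Nat) (cs : List Char), cs.length ≤ N → ∀ (total : Int),
    (∀ T r, (pvGroup cs total).val = (T, r, none) →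
        r = [] ∧ ∀ stk : List Int, ∃ j, pvLoopB cs (total :: stk) = j ++ T :: stk) ∧
    (∀ T r m, (pvGroup cs total).val = (T, r, some m) →
        (∀ (t : Int) (tl : List Int),
            pvLoopB cs (total :: t :: tl) = pvLoopB r ((t + T * m) :: tl)) ∧
        pvLoopB cs [total] = [T]) := by
  intro N
  induction N with
  | zero =>
    intro cs hlen total
    have : cs = [] := List.eq_nil_of_length_eq_zero (Nat.le_zero.mp hlen)
    subst this
    rw [pvGroup_nil]
    constructor
    · intro T r h
      injection h with h1 h2
      injection h2 with h2 h3
      subst h1; subst h2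
      exact ⟨rfl, fun stk => ⟨[], by simp [pvLoopB_nil]⟩⟩
    · intro T r m h
      injection h with h1 h2
      injection h2 with h2 h3
      exact absurd h3 (by simp)
  | succ N ih =>
    intro cs hlen total
    cases cs with
    | nil =>
      rw [pvGroup_nil]
      constructor
      · intro T r h
        injection h with h1 h2
        injection h2 with h2 h3
        subst h1; subst h2
        exact ⟨rfl, fun stk => ⟨[], by simp [pvLoopB_nil]⟩⟩
      · intro T r m h
        injection h with h1 h2
        injection h2 with h2 h3
        exact absurd h3 (by simp)
    | cons c cs =>
      have hlen' : cs.length ≤ N := by simp only [List.length_cons] at hlen; omega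
      have hspan : (pvSpanDigits cs).2.length ≤ N := by
        have := pvSpanDigits_snd_len cs
        omega
      by_cases hc : c = '('
      · -- nested group
        subst hc
        rcases hsub : (pvGroup cs 0).val with ⟨sub, r, mm⟩
        have hrlen : r.length ≤ N := by
          have := (pvGroup cs 0).property
          rw [hsub] at this
          simp at this
          omega
        cases mm with
        | none =>
          -- unclosed nested group: its total is discarded, r = []
          obtain ⟨hr0, hjunk⟩ := ((ih cs hlen' 0).1 sub r hsub)
          subst hr0
          have hres : (pvGroup ('(' :: cs) total).val = (total, [], none) := by
            rw [pvGroup_cons, if_pos rfl, hsub]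
            exact pvGroup_nil total
          constructor
          · intro T r' h
            rw [hres] at h
            injection h with h1 h2
            injection h2 with h2 h3
            subst h1; subst h2
            refine ⟨rfl, fun stk => ?_⟩
            obtain ⟨j, hj⟩ := hjunk (total :: stk)
            exact ⟨j ++ [sub], by
              rw [pvLoopB_cons]
              rw [hj]
              simp⟩
          · intro T r' m h
            rw [hres] at h
            injection h with h1 h2
            injection h2 with h2 h3
            exact absurd h3 (by simp)
        | some m =>
          -- closed nested group: fold sub*m into total and continue on r
          have hfold := ((ih cs hlen' 0).2 sub r m hsub).1
          have hres : (pvGroup ('(' :: cs) total).val = (pvGroup r (total + sub * m)).val := by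
            rw [pvGroup_cons, if_pos rfl, hsub]
          constructor
          · intro T r' h
            rw [hres] at h
            obtain ⟨hr0, hjunk⟩ := ((ih r hrlen (total + sub * m)).1 T r' h)
            refine ⟨hr0, fun stk => ?_⟩
            obtain ⟨j, hj⟩ := hjunk stk
            exact ⟨j, by
              rw [pvLoopB_cons]
              rw [hfold total stk]
              simpa using hj⟩
          · intro T r' m' h
            rw [hres] at h
            obtain ⟨hcont, hone⟩ := ((ih r hrlen (total + sub * m)).2 T r' m' h)
            constructor
            · intro t tl
              rw [pvLoopB_cons]
              rw [hfold total (t :: tl)]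
              exact hcont t tl
            · rw [pvLoopB_cons]
              rw [hfold total []]
              exact hone
      · by_cases hc2 : c = ')'
        · -- direct close
          subst hc2
          have hres : (pvGroup (')' :: cs) total).val
              = (total, (pvSpanDigits cs).2, some (pvIntOfRun (pvSpanDigits cs).1)) := by
            rw [pvGroup_cons]; simp
          constructor
          · intro T r h
            rw [hres] at h
            injection h with h1 h2
            injection h2 with h2 h3
            exact absurd h3 (by simp)
          · intro T r m h
            rw [hres] at h
            injection h with h1 h2
            injection h2 with h2 h3
            injection h3 with h3
            subst h1; subst h2; subst h3
            constructor
            · intro t tl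
              rw [pvLoopB_cons]
              simp
            · rw [pvLoopB_cons]
              simp
        · -- element char
          have hres : (pvGroup (c :: cs) total).val
              = (pvGroup (pvSpanDigits cs).2 (total + pvIntOfRun (pvSpanDigits cs).1)).val := by
            rw [pvGroup_cons]; simp [hc, hc2]
          constructor
          · intro T r h
            rw [hres] at h
            obtain ⟨hr0, hjunk⟩ :=
              ((ih _ hspan (total + pvIntOfRun (pvSpanDigits cs).1)).1 T r h)
            refine ⟨hr0, fun stk => ?_⟩
            obtain ⟨j, hj⟩ := hjunk stk
            exact ⟨j, by
              rw [pvLoopB_cons]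
              simp only [if_neg hc, if_neg hc2]
              exact hj⟩
          · intro T r m h
            rw [hres] at h
            obtain ⟨hcont, hone⟩ :=
              ((ih _ hspan (total + pvIntOfRun (pvSpanDigits cs).1)).2 T r m h)
            constructor
            · intro t tl
              rw [pvLoopB_cons]
              simp only [if_neg hc, if_neg hc2]
              exact hcont t tl
            · rw [pvLoopB_cons]
              simp only [if_neg hc, if_neg hc2]
              exact hone

-- the bottom of pvLoopB's final stack is exactly B's parsed total
theorem pv_loopB_eq_group (cs : List Char) :
    (pvLoopB cs [0]).getLastD 0 = (pvGroup cs 0).val.1 := by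
  rcases h : (pvGroup cs 0).val with ⟨T, r, mm⟩
  cases mm with
  | none =>
    obtain ⟨-, hjunk⟩ := (pv_stage2_aux cs.length cs le_rfl 0).1 T r h
    obtain ⟨j, hj⟩ := hjunk []
    rw [hj]
    simp
  | some m =>
    have hone := ((pv_stage2_aux cs.length cs le_rfl 0).2 T r m h).2
    rw [hone]
    rfl

-- ===== VERDICT (by name: the statement is the Claim_ definition above) =====
theorem count_ads_atoms_spec : Claim_equal_count_ads_atoms := by
  intro s _ hpre
  unfold Spec_count_ads_atoms count_ads_atoms count_ads_atoms_alt
  have h := pv_main (PySem.Chars.replace s.toList ['*'] []) [PySem.Dict.empty]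
    (by simpa using pv_pre_bal s hpre) (by simp)
    (by
      intro d hd
      simp only [List.mem_singleton] at hd
      subst hd
      exact PySem.Dict.nodup_keys_empty)
  have h1 : pvLoopB (PySem.Chars.replace s.toList ['*'] []) [0]
      = (pvLoopA (PySem.Chars.replace s.toList ['*'] []) [PySem.Dict.empty]).map pvSumV := by
    simpa using h.1
  simp only []
  rw [← pv_loopB_eq_group, h1, pv_getLastD_map pvSumV _ h.2 0 PySem.Dict.empty]
  rfl
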